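-- pv_equiv track=rewrite | github.com/eliottcassidy2000/math | 04-computation/beta2_four_bad_analysis.py | vertex_map_after_delete
-- ===== SOURCE A (Python) =====
-- def vertex_map_after_delete(n, v):
--     """Map from old vertex indices to new indices after deleting v."""
--     m = {}
--     new_idx = 0
--     for i in range(n):
--         if i != v:
--             m[i] = new_idx
--             new_idx += 1
--     return m
-- ===== SOURCE B (Python) =====
-- def vertex_map_after_delete(n, v):
--     """Map from old vertex indices to new indices after deleting v."""
--     return {i: i - (1 if 0 <= v < i else 0) for i in range(n) if i != v}
-- ===== Notes on version B (the rewrite author's own statement) =====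
-- stated objective: simpler
-- what changed: Replaces the running new_idx counter loop with a stateless dict comprehension that computes each new index in closed form as i minus one if the deleted vertex lies strictly below i.
import Mathlib
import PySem

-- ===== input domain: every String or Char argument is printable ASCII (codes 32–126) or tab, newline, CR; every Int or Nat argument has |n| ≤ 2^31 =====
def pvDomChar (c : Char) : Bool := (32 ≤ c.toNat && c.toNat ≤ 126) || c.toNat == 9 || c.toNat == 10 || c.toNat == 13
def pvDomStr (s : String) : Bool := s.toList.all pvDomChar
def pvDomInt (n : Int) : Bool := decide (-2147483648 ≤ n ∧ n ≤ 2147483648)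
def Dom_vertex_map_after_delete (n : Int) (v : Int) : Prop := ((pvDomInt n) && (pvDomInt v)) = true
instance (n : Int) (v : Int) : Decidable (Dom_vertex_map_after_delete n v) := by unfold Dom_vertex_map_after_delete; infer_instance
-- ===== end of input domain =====

-- B replaces A's running new_idx counter with a stateless closed-form per key (simpler decomposition; same cost).


-- ===== PORT A =====
-- m = {}; new_idx = 0; for i in range(n): if i != v: m[i] = new_idx; new_idx += 1; return m
def vertex_map_after_delete (n : Int) (v : Int) : List (Int × Int) :=
  ((PySem.List.pyRange 0 n 1).foldl
    (fun (st : PySem.Dict Int Int × Int) i =>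
      if i ≠ v then (st.1.insert i st.2, st.2 + 1) else st)
    (PySem.Dict.empty, 0)).1.items

-- ===== PORT B =====
-- {i: i - (1 if 0 <= v < i else 0) for i in range(n) if i != v}
def vertex_map_after_delete_alt (n : Int) (v : Int) : List (Int × Int) :=
  ((PySem.List.pyRange 0 n 1).filter (fun i => i ≠ v)).map
    (fun i => (i, i - if 0 ≤ v ∧ v < i then 1 else 0))

-- ===== PRECONDITION & SPEC =====
def Spec_vertex_map_after_delete (n : Int) (v : Int) (out : List (Int × Int)) : Prop := out = vertex_map_after_delete_alt n v
instance (n : Int) (v : Int) (out : List (Int × Int)) : Decidable (Spec_vertex_map_after_delete n v out) := by unfold Spec_vertex_map_after_delete; infer_instance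

-- ===== CLAIM (what is proved, stated in full; the proofs are below) =====
def Claim_equal_vertex_map_after_delete : Prop := ∀ (n : Int) (v : Int), Dom_vertex_map_after_delete n v → Spec_vertex_map_after_delete n v (vertex_map_after_delete n v)

-- ===== LEMMAS AND PROOFS =====

-- Invariant of A's loop over range(m): the dict's items are exactly B's list, and the
-- counter equals m minus one if v ∈ [0, m).
theorem loop_invariant (v : Int) (m : Nat) :
    (((PySem.List.pyRange 0 m 1).foldl
        (fun (st : PySem.Dict Int Int × Int) i =>
          if i ≠ v then (st.1.insert i st.2, st.2 + 1) else st)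
        (PySem.Dict.empty, 0)).1.items
      = ((PySem.List.pyRange 0 m 1).filter (fun i => i ≠ v)).map
          (fun i => (i, i - if 0 ≤ v ∧ v < i then 1 else 0)))
    ∧ (((PySem.List.pyRange 0 m 1).foldl
        (fun (st : PySem.Dict Int Int × Int) i =>
          if i ≠ v then (st.1.insert i st.2, st.2 + 1) else st)
        (PySem.Dict.empty, 0)).2
      = (m : Int) - if 0 ≤ v ∧ v < (m : Int) then 1 else 0) := by
  induction m with
  | zero =>
      rw [show ((0 : Nat) : Int) = 0 from rfl, PySem.List.pyRange_one_eq_nil le_rfl]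
      exact ⟨rfl, by show (0 : Int) = _; split_ifs <;> omega⟩
  | succ k ih =>
      obtain ⟨hitems, hcnt⟩ := ih
      have hsplit : PySem.List.pyRange 0 ((k : Int) + 1) 1
          = PySem.List.pyRange 0 (k : Int) 1 ++ [(k : Int)] :=
        PySem.List.pyRange_one_succ_right (by exact_mod_cast Nat.zero_le k)
      have hcast : ((k + 1 : Nat) : Int) = (k : Int) + 1 := by push_cast; ring
      rw [hcast, hsplit, List.foldl_append]
      set st := (PySem.List.pyRange 0 (k : Int) 1).foldl
          (fun (st : PySem.Dict Int Int × Int) i =>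
            if i ≠ v then (st.1.insert i st.2, st.2 + 1) else st)
          (PySem.Dict.empty, 0) with hst
      have hkeys : ∀ p ∈ st.1.items, p.1 < (k : Int) := by
        intro p hp
        rw [hitems] at hp
        obtain ⟨i, hi, rfl⟩ := List.mem_map.mp hp
        have := (PySem.List.mem_pyRange_one).mp (List.mem_filter.mp hi).1
        simpa using this.2
      have hfresh : st.1.contains (k : Int) = false := by
        rw [PySem.Dict.contains_eq_decide_mem_keys]
        simp only [PySem.Dict.keys, decide_eq_false_iff_not]
        intro hmem
        obtain ⟨p, hp, hpk⟩ := List.mem_map.mp hmem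
        exact absurd (hpk ▸ hkeys p hp) (lt_irrefl _)
      simp only [List.foldl_cons, List.foldl_nil]
      by_cases hv : (k : Int) = v
      · -- i = v: skipped by the loop and dropped by the filter; counter unchanged
        rw [if_neg (not_not_intro hv)]
        constructor
        · rw [hitems, List.filter_append]
          simp [hv]
        · rw [hcnt]; split_ifs <;> omega
      · -- i ≠ v: fresh key appended; B's closed-form value equals the counter
        rw [if_pos hv]
        constructor
        · show (st.1.insert (k : Int) st.2).items = _
          rw [PySem.Dict.items_insert_of_not_contains _ _ hfresh, hitems, hcnt,
            List.filter_append]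
          simp [hv]
        · show st.2 + 1 = _
          rw [hcnt]; split_ifs <;> omega

-- ===== VERDICT (by name: the statement is the Claim_ definition above) =====
theorem vertex_map_after_delete_spec : Claim_equal_vertex_map_after_delete := by
  intro n v _
  unfold Spec_vertex_map_after_delete vertex_map_after_delete vertex_map_after_delete_alt
  by_cases hn : n ≤ 0
  · rw [PySem.List.pyRange_one_eq_nil hn]; rfl
  · have hn' : n = ((n.toNat : Nat) : Int) := by omega
    rw [hn']
    exact (loop_invariant v n.toNat).1
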